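-- pv_equiv track=rewrite | github.com/ThomasTrepanier/log6307-final-project | data/interim/stackoverflow/src/python/23_21.py | mst_score
-- ===== SOURCE A (Python) =====
-- def dissimilar(t1, t2):
--     a, b, c = t1
--     x, y, z = t2
--     return (a != x) + (b != y) + (c != z)
--
-- def mst_score(data):
--     dist = dict.fromkeys(data, 3)
--     dist[data[0]] = 0
--     score = 0
--     while dist:
--         one = min(dist, key=dist.get)
--         score += dist.pop(one)
--         for other in dist:
--             dist[other] = min(dist[other], dissimilar(one, other))
--     return score
-- ===== SOURCE B (Python) =====
-- def dissimilar(t1, t2):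
--     a, b, c = t1
--     x, y, z = t2
--     return (a != x) + (b != y) + (c != z)
--
-- def mst_score(data):
--     # lazy Prim: keep only the tree and the remaining vertices; recompute each
--     # candidate's distance to the tree instead of maintaining a distance dict
--     seen = set()
--     vs = []
--     for t in data:
--         if t not in seen:
--             seen.add(t)
--             vs.append(t)
--     tree = [vs[0]]
--     rest = vs[1:]
--     score = 0
--     while rest:
--         best_i = 0
--         best_d = 4
--         for i, v in enumerate(rest):
--             d = 4
--             for u in tree:
--                 d = min(d, dissimilar(u, v))
--             if d < best_d:
--                 best_i = i
--                 best_d = d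
--         score += best_d
--         tree.append(rest.pop(best_i))
--     return score
-- ===== Notes on version B (the rewrite author's own statement) =====
-- stated objective: alternative
-- what changed: A runs eager Prim on a dict of best-known distances, decrease-keying every remaining row after each pop; B runs lazy Prim keeping only the tree and the remaining rows and recomputing each candidate's distance to the tree at selection time, so the distance cache and its update pass disappear.
import Mathlib
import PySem

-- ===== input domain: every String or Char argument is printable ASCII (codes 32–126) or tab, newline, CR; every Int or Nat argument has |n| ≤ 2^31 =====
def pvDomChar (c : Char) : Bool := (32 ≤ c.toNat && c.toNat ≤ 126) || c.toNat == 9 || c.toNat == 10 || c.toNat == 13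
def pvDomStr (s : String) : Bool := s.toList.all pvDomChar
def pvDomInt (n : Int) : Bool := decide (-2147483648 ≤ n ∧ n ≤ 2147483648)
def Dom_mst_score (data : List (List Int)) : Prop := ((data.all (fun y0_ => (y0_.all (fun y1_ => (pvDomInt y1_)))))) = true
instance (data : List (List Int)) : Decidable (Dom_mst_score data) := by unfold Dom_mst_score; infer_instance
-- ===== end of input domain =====

-- B replaces A's eager Prim (a dict of best distances updated after every pop) by a lazy Prim that
-- keeps only the tree and the remaining vertices and recomputes each candidate's distance to the
-- tree; objective: alternative (no distance cache), not faster.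

-- ===== PORT A =====

-- shared helper of both Python files
def dissimilar (t1 t2 : List Int) : Int :=
  match t1, t2 with
  | [a, b, c], [x, y, z] =>
      (if a ≠ x then 1 else 0) + (if b ≠ y then 1 else 0) + (if c ≠ z then 1 else 0)
  | _, _ => 0  -- Python raises ValueError (tuple unpacking) here; Pre_ keeps such calls unreachable

-- the 'while dist:' loop; fuel = dist.size makes it total (one key is popped per iteration)
def primLoop (fuel : Nat) (dist : PySem.Dict (List Int) Int) (score : Int) : Int :=
  match fuel with
  | 0 => score
  | fuel + 1 =>
    if dist.size = 0 then score
    else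
      match PySem.List.min? dist.keys (fun k => dist.getD k 0) with
      | none => score  -- unreachable: dist is nonempty
      | some one =>
          let score := score + dist.getD one 0
          let dist := dist.erase one
          let dist := dist.keys.foldl
            (fun d k => d.insert k (min (d.getD k 0) (dissimilar one k))) dist
          primLoop fuel dist score

def mst_score (data : List (List Int)) : Int :=
  let dist := data.foldl (fun d k => d.insert k (3 : Int)) PySem.Dict.empty
  match PySem.List.pyGet? data 0 with
  | none => 0  -- Python IndexError (data[0]) on empty data; excluded by Pre_
  | some k0 =>
      let dist := dist.insert k0 0
      primLoop dist.size dist 0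

-- ===== PORT B =====

-- d = 4; for u in tree: d = min(d, dissimilar(u, v))
def treeDist (tree : List (List Int)) (v : List Int) : Int :=
  tree.foldl (fun d u => min d (dissimilar u v)) 4

-- the 'for i, v in enumerate(rest)' scan: state (i, best_i, best_d)
def selectBest (tree rest : List (List Int)) : Nat × Int :=
  (rest.foldl (fun s v =>
      let d := treeDist tree v
      (s.1 + 1, if d < s.2.2 then (s.1, d) else s.2)) ((0, 0, 4) : Nat × Nat × Int)).2

-- the 'while rest:' loop of B; the index bound check only makes the recursion total
def bLoop (tree rest : List (List Int)) (score : Int) : Int :=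
  match rest with
  | [] => score
  | v :: rs =>
    if h : (selectBest tree (v :: rs)).1 < (v :: rs).length then
      bLoop (tree ++ [(v :: rs)[(selectBest tree (v :: rs)).1]])
        ((v :: rs).eraseIdx (selectBest tree (v :: rs)).1) (score + (selectBest tree (v :: rs)).2)
    else score + (selectBest tree (v :: rs)).2  -- unreachable: selectBest returns an index of rest
termination_by rest.length
decreasing_by simp only [List.length_eraseIdx, if_pos h]; simp

def mst_score_alt (data : List (List Int)) : Int :=
  match PySem.Set.ofList data with  -- the seen/vs dedup loop: distinct rows in first-occurrence order
  | [] => 0  -- Python IndexError (vs[0]) on empty data; excluded by Pre_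
  | v0 :: rest => bLoop [v0] rest 0

-- ===== PRECONDITION & SPEC =====
-- Pre_ excludes exactly the inputs where Python A raises: empty data (IndexError on data[0]), and
-- data with at least two distinct rows among which some row does not have length 3
-- (ValueError during tuple unpacking in dissimilar).
def Pre_mst_score (data : List (List Int)) : Prop :=
  data ≠ [] ∧ ((∀ r ∈ data, r.length = 3) ∨ ∀ r ∈ data, r = data.headI)
instance (data : List (List Int)) : Decidable (Pre_mst_score data) := by
  unfold Pre_mst_score; infer_instance

def pvWitness_mst_score : List (List Int) := [[1, 2, 3], [1, 2, 4], [0, 2, 4]]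

def Spec_mst_score (data : List (List Int)) (out : Int) : Prop := out = mst_score_alt data
instance (data : List (List Int)) (out : Int) : Decidable (Spec_mst_score data out) := by
  unfold Spec_mst_score; infer_instance

-- ===== CLAIM (what is proved, stated in full; the proofs are below) =====
def Claim_equal_mst_score : Prop := ∀ (data : List (List Int)), Dom_mst_score data → Pre_mst_score data → Spec_mst_score data (mst_score data)

-- ===== LEMMAS AND PROOFS =====

theorem diss_le (t1 t2 : List Int) : dissimilar t1 t2 ≤ 3 := by
  unfold dissimilar; split
  · split_ifs <;> norm_num
  · norm_num

theorem treeDist_le (tree : List (List Int)) (v : List Int) (a : Int) :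
    tree.foldl (fun d u => min d (dissimilar u v)) a ≤ a := by
  induction tree generalizing a with
  | nil => simp
  | cons u us ih => exact le_trans (ih _) (min_le_left _ _)

theorem treeDist_le3 (tree : List (List Int)) (v : List Int) (h : tree ≠ []) :
    treeDist tree v ≤ 3 := by
  match tree with
  | u :: us =>
      calc (u :: us).foldl (fun d u => min d (dissimilar u v)) 4
          ≤ min 4 (dissimilar u v) := treeDist_le us v _
        _ ≤ dissimilar u v := min_le_right _ _
        _ ≤ 3 := diss_le u v

theorem treeDist_append (tree : List (List Int)) (one v : List Int) :
    treeDist (tree ++ [one]) v = min (treeDist tree v) (dissimilar one v) := by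
  simp [treeDist, List.foldl_append]

-- getD on a dict whose items are a key-determined map
theorem getD_mapDict (l : List (List Int)) (g : List Int → Int) (k : List Int) (hk : k ∈ l) :
    (PySem.Dict.mk (l.map (fun v => (v, g v)))).getD k 0 = g k := by
  induction l with
  | nil => cases hk
  | cons v vs ih =>
      by_cases hv : v = k
      · subst hv; simp [PySem.Dict.getD, PySem.Dict.get?]
      · rcases List.mem_cons.mp hk with h | h
        · exact absurd h.symm hv
        · simpa [PySem.Dict.getD, PySem.Dict.get?, hv] using ih h


-- Python min(xs, key) on a nonempty list is a running first-strict-min fold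
theorem min?_cons (f : List Int → Int) :
    ∀ (t : List (List Int)) (x : List Int),
    PySem.List.min? (x :: t) f = some (t.foldl (fun m y => if f y < f m then y else m) x) := by
  intro t
  induction t with
  | nil => intro x; rfl
  | cons y ys ih =>
      intro x
      have step : PySem.List.min? (x :: y :: ys) f
          = PySem.List.min? ((if f y < f x then y else x) :: ys) f := by
        simp only [PySem.List.min?, List.foldl_cons]
        by_cases h : f y < f x <;> simp [h]
      rw [step, ih, List.foldl_cons]

theorem minFold_congr (f f' : List Int → Int) (t : List (List Int)) (m : List Int)
    (hm : f m = f' m) (h : ∀ x ∈ t, f x = f' x) :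
    t.foldl (fun m y => if f y < f m then y else m) m
      = t.foldl (fun m y => if f' y < f' m then y else m) m := by
  induction t generalizing m with
  | nil => rfl
  | cons y ys ih =>
      have hy := h y (List.mem_cons_self ..)
      have htail := fun x hx => h x (List.mem_cons_of_mem y hx)
      by_cases hc : f y < f m
      · have hc' : f' y < f' m := by rw [← hy, ← hm]; exact hc
        simp only [List.foldl_cons, if_pos hc, if_pos hc']
        exact ih y hy htail
      · have hc' : ¬ f' y < f' m := by rw [← hy, ← hm]; exact hc
        simp only [List.foldl_cons, if_neg hc, if_neg hc']
        exact ih m hm htail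

theorem min?_congr (f f' : List Int → Int) (l : List (List Int))
    (h : ∀ x ∈ l, f x = f' x) :
    PySem.List.min? l f = PySem.List.min? l f' := by
  match l with
  | [] => rfl
  | x :: t =>
      rw [min?_cons, min?_cons,
        minFold_congr f f' t x (h x (List.mem_cons_self ..))
          (fun y hy => h y (List.mem_cons_of_mem _ hy))]

theorem minFold_stay (f : List Int → Int) (t : List (List Int)) (m : List Int)
    (h : ∀ y ∈ t, ¬ f y < f m) :
    t.foldl (fun m y => if f y < f m then y else m) m = m := by
  induction t with
  | nil => rfl
  | cons y ys ih =>
      simp only [List.foldl_cons, if_neg (h y (List.mem_cons_self ..))]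
      exact ih (fun x hx => h x (List.mem_cons_of_mem _ hx))

-- B's enumerate scan, related to the min fold
theorem sel_aux (tree : List (List Int)) (rs : List (List Int)) :
    ∀ (c bi : Nat) (one : List Int),
    ∃ bi' one',
      rs.foldl (fun s v =>
          let d := treeDist tree v
          (s.1 + 1, if d < s.2.2 then (s.1, d) else s.2))
        ((c, bi, treeDist tree one) : Nat × Nat × Int)
        = (c + rs.length, bi', treeDist tree one') ∧
      rs.foldl (fun m y => if treeDist tree y < treeDist tree m then y else m) one = one' ∧
      ((bi' = bi ∧ one' = one) ∨ ∃ j, j < rs.length ∧ bi' = c + j ∧ rs[j]? = some one') := by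
  induction rs with
  | nil => exact fun c bi one => ⟨bi, one, by simp, rfl, Or.inl ⟨rfl, rfl⟩⟩
  | cons v rs ih =>
      intro c bi one
      by_cases hc : treeDist tree v < treeDist tree one
      · obtain ⟨bi', one', h1, h2, h3⟩ := ih (c + 1) c v
        refine ⟨bi', one', ?_, ?_, ?_⟩
        · simpa [hc, Nat.add_assoc, Nat.add_comm 1 rs.length] using h1
        · simpa [hc] using h2
        · rcases h3 with ⟨hb, ho⟩ | ⟨j, hj, hb, hv⟩
          · exact Or.inr ⟨0, by simp, by omega, by simp [ho]⟩
          · exact Or.inr ⟨j + 1, by simpa using hj, by omega, by simpa using hv⟩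
      · obtain ⟨bi', one', h1, h2, h3⟩ := ih (c + 1) bi one
        refine ⟨bi', one', ?_, ?_, ?_⟩
        · simpa [hc, Nat.add_assoc, Nat.add_comm 1 rs.length] using h1
        · simpa [hc] using h2
        · rcases h3 with ⟨hb, ho⟩ | ⟨j, hj, hb, hv⟩
          · exact Or.inl ⟨hb, ho⟩
          · exact Or.inr ⟨j + 1, by simpa using hj, by omega, by simpa using hv⟩

theorem selectBest_spec (tree : List (List Int)) (v : List Int) (rs : List (List Int))
    (htree : tree ≠ []) :
    ∃ i0 one, selectBest tree (v :: rs) = (i0, treeDist tree one) ∧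
      PySem.List.min? (v :: rs) (treeDist tree) = some one ∧
      (v :: rs)[i0]? = some one ∧ i0 < (v :: rs).length := by
  have h4 : treeDist tree v < 4 := lt_of_le_of_lt (treeDist_le3 tree v htree) (by norm_num)
  obtain ⟨bi', one', h1, h2, h3⟩ := sel_aux tree rs 1 0 v
  refine ⟨bi', one', ?_, ?_, ?_, ?_⟩
  · simp only [selectBest, List.foldl_cons, if_pos h4]
    rw [h1]
  · rw [min?_cons, h2]
  · rcases h3 with ⟨hb, ho⟩ | ⟨j, hj, hb, hv⟩
    · simp [hb, ho]
    · subst hb; rw [Nat.add_comm 1 j]; simpa using hv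
  · rcases h3 with ⟨hb, ho⟩ | ⟨j, hj, hb, hv⟩
    · simp [hb]
    · subst hb; simp; omega

-- removing the entry found at a nodup position is erasing that position
theorem filter_eq_eraseIdx (l : List (List Int)) (i : Nat) (a : List Int)
    (hnd : l.Nodup) (hi : l[i]? = some a) :
    l.filter (fun v => !(v == a)) = l.eraseIdx i := by
  induction l generalizing i with
  | nil => simp at hi
  | cons v vs ih =>
      cases i with
      | zero =>
          have hva : v = a := by simpa using hi
          subst hva
          have hninv : v ∉ vs := (List.nodup_cons.mp hnd).1
          simp only [List.filter_cons, beq_self_eq_true, Bool.not_true, List.eraseIdx_cons_zero,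
            Bool.false_eq_true, if_false]
          refine List.filter_eq_self.mpr (fun x hx => ?_)
          simp only [Bool.not_eq_true']
          exact beq_false_of_ne (fun hxa => hninv (by rw [← hxa]; exact hx))
      | succ i =>
          have hmem : a ∈ vs := List.mem_of_getElem? (by simpa using hi)
          have hva : (v == a) = false :=
            beq_false_of_ne (fun hva => (List.nodup_cons.mp hnd).1 (hva ▸ hmem))
          simp only [List.filter_cons, hva, Bool.not_false, List.eraseIdx_cons_succ, if_true]
          rw [ih i (List.nodup_cons.mp hnd).2 (by simpa using hi)]

-- the value-update pass over the keys of a key-determined dict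
theorem upd_eq (hf : List Int → Int) (f : List Int → Int) :
    ∀ (l2 l1 : List (List Int)), (l1 ++ l2).Nodup →
    l2.foldl (fun d k => d.insert k (min (d.getD k 0) (hf k)))
        (PySem.Dict.mk (l1.map (fun v => (v, min (f v) (hf v))) ++ l2.map (fun v => (v, f v))))
      = PySem.Dict.mk ((l1 ++ l2).map (fun v => (v, min (f v) (hf v)))) := by
  intro l2
  induction l2 with
  | nil => intro l1 _; simp
  | cons k ks ih =>
      intro l1 hnd
      have hdisj := List.disjoint_of_nodup_append hnd
      have hkl1 : k ∉ l1 := fun h => hdisj h (List.mem_cons_self ..)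
      have hkks : k ∉ ks := ((List.nodup_cons.mp (List.Nodup.of_append_right hnd)).1)
      -- the lookup of k in the current dict sees the (k, f k) entry
      have hfind1 : List.find? (fun p => p.1 == k) (l1.map (fun v => (v, min (f v) (hf v)))) = none := by
        refine List.find?_eq_none.mpr ?_
        rintro ⟨x1, x2⟩ hx
        obtain ⟨v, hv, hveq⟩ := List.mem_map.mp hx
        cases hveq
        simp only [beq_iff_eq]
        exact fun h => hkl1 (h ▸ hv)
      have hget : (PySem.Dict.mk (l1.map (fun v => (v, min (f v) (hf v))) ++ (k :: ks).map (fun v => (v, f v)))).getD k 0 = f k := by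
        simp [PySem.Dict.getD, PySem.Dict.get?, List.find?_append, hfind1]
      have hitems : (PySem.Dict.mk (l1.map (fun v => (v, min (f v) (hf v))) ++ (k :: ks).map (fun v => (v, f v)))).insert k (min (f k) (hf k))
          = PySem.Dict.mk ((l1 ++ [k]).map (fun v => (v, min (f v) (hf v))) ++ ks.map (fun v => (v, f v))) := by
        have hcont : (PySem.Dict.mk (l1.map (fun v => (v, min (f v) (hf v))) ++ (k :: ks).map (fun v => (v, f v)))).contains k = true := by
          simp [PySem.Dict.contains]
        apply PySem.Dict.ext
        rw [PySem.Dict.items_insert_of_contains _ _ hcont]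
        simp only [List.map_append, List.map_map, List.map_cons, List.map_nil, beq_self_eq_true,
          if_true, List.nil_append, List.append_assoc, List.cons_append]
        congr 1
        · exact List.map_congr_left (fun v hv => by
            have hne : v ≠ k := fun h => hkl1 (h ▸ hv)
            simp [hne])
        · congr 1
          exact List.map_congr_left (fun v hv => by
            have hne : v ≠ k := fun h => hkks (h ▸ hv)
            simp [hne])
      simp only [List.foldl_cons]
      rw [hget, hitems, ih (l1 ++ [k]) (by simpa [List.append_assoc] using hnd)]
      simp [List.append_assoc]

-- dict.fromkeys(data, 3): ordered dedup of the rows, each mapped to 3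
theorem foldl_add_structure : ∀ (t : List (List Int)) (s : List (List Int)),
    ∃ u, t.foldl PySem.Set.add s = s ++ u := by
  intro t
  induction t with
  | nil => exact fun s => ⟨[], by simp⟩
  | cons x xs ih =>
      intro s
      by_cases hx : x ∈ s
      · obtain ⟨u, hu⟩ := ih s
        exact ⟨u, by simpa [PySem.Set.add, PySem.Set.contains, hx] using hu⟩
      · obtain ⟨u, hu⟩ := ih (s ++ [x])
        exact ⟨x :: u, by simpa [PySem.Set.add, PySem.Set.contains, hx] using hu⟩

theorem ofList_cons (d : List Int) (t : List (List Int)) :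
    ∃ tl, PySem.Set.ofList (d :: t) = d :: tl := by
  obtain ⟨u, hu⟩ := foldl_add_structure t [d]
  exact ⟨u, by simpa [PySem.Set.ofList, PySem.Set.add, PySem.Set.empty, PySem.Set.contains] using hu⟩

theorem init_dict : ∀ (data : List (List Int)) (s : List (List Int)),
    data.foldl (fun d k => d.insert k (3 : Int)) (PySem.Dict.mk (s.map (fun v => (v, (3 : Int)))))
      = PySem.Dict.mk ((data.foldl PySem.Set.add s).map (fun v => (v, (3 : Int)))) := by
  intro data
  induction data with
  | nil => intro s; simp
  | cons k t ih =>
      intro s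
      have hstep : (PySem.Dict.mk (s.map (fun v => (v, (3 : Int))))).insert k 3
          = PySem.Dict.mk ((PySem.Set.add s k).map (fun v => (v, (3 : Int)))) := by
        by_cases hk : k ∈ s
        · have hcont : (PySem.Dict.mk (s.map (fun v => (v, (3 : Int))))).contains k = true := by
            simpa [PySem.Dict.contains, List.any_map, Function.comp] using hk
          have hadd : PySem.Set.add s k = s := by
            simp [PySem.Set.add, PySem.Set.contains, hk]
          apply PySem.Dict.ext
          rw [PySem.Dict.items_insert_of_contains _ _ hcont]
          rw [hadd, List.map_map]
          exact List.map_congr_left (fun v _ => by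
            by_cases hv : v = k <;> simp [hv])
        · have hcont : (PySem.Dict.mk (s.map (fun v => (v, (3 : Int))))).contains k = false := by
            simp [PySem.Dict.contains, List.any_map, Function.comp]
            exact fun x hx hxk => hk (hxk ▸ hx)
          have hadd : PySem.Set.add s k = s ++ [k] := by
            simp [PySem.Set.add, PySem.Set.contains, hk]
          simp [PySem.Dict.insert, hcont, hadd]
      rw [List.foldl_cons, hstep, ih (PySem.Set.add s k), List.foldl_cons]

theorem getD_cons_ne (k h : List Int) (w : Int) (l : List (List Int × Int)) (hne : h ≠ k) :
    (PySem.Dict.mk ((h, w) :: l)).getD k 0 = (PySem.Dict.mk l).getD k 0 := by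
  simp [PySem.Dict.getD, PySem.Dict.get?, beq_false_of_ne hne]

theorem insert_head (h : List Int) (tl : List (List Int)) (hh : h ∉ tl) :
    (PySem.Dict.mk ((h :: tl).map (fun v => (v, (3 : Int))))).insert h 0
      = PySem.Dict.mk ((h, (0 : Int)) :: tl.map (fun v => (v, (3 : Int)))) := by
  have hcont : (PySem.Dict.mk ((h :: tl).map (fun v => (v, (3 : Int))))).contains h = true := by
    simp [PySem.Dict.contains]
  apply PySem.Dict.ext
  rw [PySem.Dict.items_insert_of_contains _ _ hcont]
  simp only [List.map_cons, List.map_map, beq_self_eq_true, if_true]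
  congr 1
  exact List.map_congr_left (fun v hv => by
    have hne : v ≠ h := fun he => hh (he ▸ hv)
    simp [hne])

-- the Prim loop on a dict whose values are exactly the distances to the current tree
theorem loop_eq : ∀ (n : Nat) (rest : List (List Int)), rest.length = n →
    ∀ (tree : List (List Int)) (score : Int), rest.Nodup → tree ≠ [] →
    primLoop n (PySem.Dict.mk (rest.map (fun v => (v, treeDist tree v)))) score
      = bLoop tree rest score := by
  intro n
  induction n using Nat.strong_induction_on with
  | _ n ih =>
      intro rest hlen tree score hnd htree
      match rest, hlen with
      | [], hlen =>
          subst hlen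
          simp only [List.length_nil]
          rw [bLoop]
          rfl
      | v :: rs, hlen =>
          subst hlen
          obtain ⟨i0, one, hsel, hmin, hidx, hbound⟩ := selectBest_spec tree v rs htree
          have hone_mem : one ∈ v :: rs := List.mem_of_getElem? hidx
          -- A side, one unfolding of primLoop
          have hsize : (PySem.Dict.mk ((v :: rs).map (fun w => (w, treeDist tree w)))).size ≠ 0 := by
            simp [PySem.Dict.size]
          have hcompfst : ((fun x : List Int × Int => x.1) ∘ fun w : List Int => (w, treeDist tree w)) = id := rfl
          have hkeys : (PySem.Dict.mk ((v :: rs).map (fun w => (w, treeDist tree w)))).keys = v :: rs := by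
            simp [PySem.Dict.keys, List.map_map, hcompfst]
          have hmin' : PySem.List.min? (PySem.Dict.mk ((v :: rs).map (fun w => (w, treeDist tree w)))).keys
              (fun k => (PySem.Dict.mk ((v :: rs).map (fun w => (w, treeDist tree w)))).getD k 0) = some one := by
            rw [hkeys, min?_congr _ (treeDist tree) _
              (fun x hx => getD_mapDict (v :: rs) (treeDist tree) x hx), hmin]
          have hval : (PySem.Dict.mk ((v :: rs).map (fun w => (w, treeDist tree w)))).getD one 0
              = treeDist tree one := getD_mapDict _ _ _ hone_mem
          have herase : (PySem.Dict.mk ((v :: rs).map (fun w => (w, treeDist tree w)))).erase one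
              = PySem.Dict.mk (((v :: rs).eraseIdx i0).map (fun w => (w, treeDist tree w))) := by
            apply PySem.Dict.ext
            simp only [PySem.Dict.erase, List.filter_map]
            rw [show ((fun p => !(p.1 == one)) ∘ (fun w : List Int => (w, treeDist tree w)))
                = (fun w => !(w == one)) from rfl]
            rw [filter_eq_eraseIdx (v :: rs) i0 one hnd hidx]
          have hkeys2 : (PySem.Dict.mk (((v :: rs).eraseIdx i0).map (fun w => (w, treeDist tree w)))).keys
              = (v :: rs).eraseIdx i0 := by
            simp [PySem.Dict.keys, List.map_map, hcompfst]
          have hnd2 : ((v :: rs).eraseIdx i0).Nodup := (List.eraseIdx_sublist _ i0).nodup hnd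
          have hupd := upd_eq (dissimilar one) (treeDist tree) ((v :: rs).eraseIdx i0) [] (by simpa using hnd2)
          simp only [List.map_nil, List.nil_append] at hupd
          have hupd2 : PySem.Dict.mk (((v :: rs).eraseIdx i0).map
                (fun w => (w, min (treeDist tree w) (dissimilar one w))))
              = PySem.Dict.mk (((v :: rs).eraseIdx i0).map (fun w => (w, treeDist (tree ++ [one]) w))) := by
            congr 1
            exact List.map_congr_left (fun w _ => by rw [treeDist_append])
          have hlen2 : ((v :: rs).eraseIdx i0).length = rs.length := by
            rw [List.length_eraseIdx, if_pos hbound]; rfl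
          have hA : primLoop (rs.length + 1) (PySem.Dict.mk ((v :: rs).map (fun w => (w, treeDist tree w)))) score
              = primLoop rs.length (PySem.Dict.mk (((v :: rs).eraseIdx i0).map
                  (fun w => (w, treeDist (tree ++ [one]) w)))) (score + treeDist tree one) := by
            rw [primLoop]
            rw [if_neg hsize, hmin']
            simp only []
            rw [hval, herase, hkeys2, hupd, hupd2]
          -- B side, one unfolding of bLoop
          have hget : (v :: rs)[i0] = one := by
            have := List.getElem?_eq_getElem hbound
            rw [hidx] at this
            exact (Option.some.inj this).symm
          have hB : bLoop tree (v :: rs) score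
              = bLoop (tree ++ [one]) ((v :: rs).eraseIdx i0) (score + treeDist tree one) := by
            rw [bLoop, hsel]
            rw [dif_pos hbound]
            simp [hget]
          simp only [List.length_cons]
          rw [hA, hB]
          exact ih rs.length (by simp) _ hlen2 (tree ++ [one]) (score + treeDist tree one)
            hnd2 (by simp)

-- ===== VERDICT (by name: the statement is the Claim_ definition above) =====
theorem mst_score_spec : Claim_equal_mst_score := by
  unfold Claim_equal_mst_score
  intro data _ hpre
  unfold Spec_mst_score
  obtain ⟨hne, -⟩ := hpre
  match data with
  | [] => exact absurd rfl hne
  | d :: t =>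
      obtain ⟨tl, htl⟩ := ofList_cons d t
      have hnd : (d :: tl).Nodup := htl ▸ PySem.Set.nodup_ofList (d :: t)
      have hdn : d ∉ tl := (List.nodup_cons.mp hnd).1
      have hndtl : tl.Nodup := (List.nodup_cons.mp hnd).2
      have hcomp3 : ((fun x : List Int × Int => x.1) ∘ fun v : List Int => (v, (3 : Int))) = id := rfl
      have hB : mst_score_alt (d :: t) = bLoop [d] tl 0 := by
        unfold mst_score_alt
        rw [htl]
      have hA : mst_score (d :: t) = bLoop [d] tl 0 := by
        unfold mst_score
        rw [show PySem.List.pyGet? (d :: t) 0 = some d by simp [pysem]]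
        simp only []
        have h1 : (d :: t).foldl (fun dd k => dd.insert k (3 : Int)) PySem.Dict.empty
            = PySem.Dict.mk ((d :: tl).map (fun v => (v, (3 : Int)))) := by
          have h := init_dict (d :: t) []
          simp only [List.map_nil] at h
          rw [show (PySem.Dict.empty : PySem.Dict (List Int) Int) = PySem.Dict.mk [] from rfl, h]
          rw [show (d :: t).foldl PySem.Set.add [] = PySem.Set.ofList (d :: t) from rfl, htl]
        rw [h1, insert_head d tl hdn]
        have hsize : (PySem.Dict.mk ((d, (0 : Int)) :: tl.map (fun v => (v, (3 : Int))))).size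
            = tl.length + 1 := by simp [PySem.Dict.size]
        rw [hsize, primLoop, if_neg (by simp [PySem.Dict.size])]
        have hkeys1 : (PySem.Dict.mk ((d, (0 : Int)) :: tl.map (fun v => (v, (3 : Int))))).keys
            = d :: tl := by simp [PySem.Dict.keys, List.map_map, hcomp3]
        have hgd : (PySem.Dict.mk ((d, (0 : Int)) :: tl.map (fun v => (v, (3 : Int))))).getD d 0
            = 0 := by simp [PySem.Dict.getD, PySem.Dict.get?]
        have hgtl : ∀ y ∈ tl,
            (PySem.Dict.mk ((d, (0 : Int)) :: tl.map (fun v => (v, (3 : Int))))).getD y 0 = 3 := by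
          intro y hy
          have hyd : d ≠ y := fun h => hdn (h ▸ hy)
          rw [getD_cons_ne y d 0 _ hyd]
          exact getD_mapDict tl (fun _ => 3) y hy
        have hmin1 : PySem.List.min? (d :: tl)
            (fun k => (PySem.Dict.mk ((d, (0 : Int)) :: tl.map (fun v => (v, (3 : Int))))).getD k 0)
            = some d := by
          rw [min?_cons]
          congr 1
          apply minFold_stay
          intro y hy
          rw [hgd, hgtl y hy]
          norm_num
        rw [hkeys1, hmin1]
        simp only []
        rw [hgd]
        have herase1 : (PySem.Dict.mk ((d, (0 : Int)) :: tl.map (fun v => (v, (3 : Int))))).erase d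
            = PySem.Dict.mk (tl.map (fun v => (v, (3 : Int)))) := by
          apply PySem.Dict.ext
          simp only [PySem.Dict.erase, List.filter_cons, beq_self_eq_true, Bool.not_true,
            Bool.false_eq_true, if_false]
          rw [List.filter_map]
          rw [show ((fun p => !(p.1 == d)) ∘ (fun v : List Int => (v, (3 : Int))))
              = (fun v => !(v == d)) from rfl]
          rw [List.filter_eq_self.mpr (fun x hx => by
            simp only [Bool.not_eq_true']
            exact beq_false_of_ne (fun h => hdn (h ▸ hx)))]
        rw [herase1]
        have hkeys3 : (PySem.Dict.mk (tl.map (fun v => (v, (3 : Int))))).keys = tl := by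
          simp [PySem.Dict.keys, List.map_map, hcomp3]
        rw [hkeys3]
        have hupd := upd_eq (dissimilar d) (fun _ => (3 : Int)) tl [] (by simpa using hndtl)
        simp only [List.map_nil, List.nil_append] at hupd
        rw [hupd]
        have hconv : tl.map (fun v => (v, min (3 : Int) (dissimilar d v)))
            = tl.map (fun v => (v, treeDist [d] v)) := by
          apply List.map_congr_left
          intro v _
          have h1 : treeDist [d] v = min 4 (dissimilar d v) := rfl
          have h2 := diss_le d v
          rw [h1]
          congr 1
          omega
        rw [hconv, show (0 : Int) + 0 = 0 from rfl]
        exact loop_eq tl.length tl rfl [d] 0 hndtl (by simp)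
      rw [hA, hB]
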